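-- pv_equiv track=rewrite | github.com/Mehakpreet21/OnlineGrading-1 | test.py | get_testing_code
-- ===== SOURCE A (Python) =====
-- def get_testing_code(name: str, testcases: str):
--     params = []
--     output = []
--
--     is_param = True
--     for line in testcases.splitlines():
--         line = line.strip()
--
--         # skip blank lines and comments
--         if len(line) == 0 or line.startswith("#"): continue
--
--         if is_param:
--             params.append(f"{name}({line})")
--         else:
--             output.append(line)
--
--         is_param = not is_param
--
--     return params, output
-- ===== SOURCE B (Python) =====
-- def _deinterleave(xs):
--     # split a list into its even-index and odd-index elements, two at a time
--     if not xs: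
--         return [], []
--     if len(xs) == 1:
--         return [xs[0]], []
--     e, o = _deinterleave(xs[2:])
--     return [xs[0]] + e, [xs[1]] + o
--
--
-- def get_testing_code(name: str, testcases: str):
--     filtered = [s for s in map(str.strip, testcases.splitlines())
--                 if s and not s.startswith("#")]
--     evens, odds = _deinterleave(filtered)
--     return [f"{name}({x})" for x in evens], odds
-- ===== Notes on version B (the rewrite author's own statement) =====
-- stated objective: simpler
-- what changed: Replaced A's single pass with an is_param toggle by a two-phase decomposition: one filter pass collecting the stripped non-blank non-comment lines, then a two-at-a-time deinterleave of that list into params and expected outputs.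
import Mathlib
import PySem

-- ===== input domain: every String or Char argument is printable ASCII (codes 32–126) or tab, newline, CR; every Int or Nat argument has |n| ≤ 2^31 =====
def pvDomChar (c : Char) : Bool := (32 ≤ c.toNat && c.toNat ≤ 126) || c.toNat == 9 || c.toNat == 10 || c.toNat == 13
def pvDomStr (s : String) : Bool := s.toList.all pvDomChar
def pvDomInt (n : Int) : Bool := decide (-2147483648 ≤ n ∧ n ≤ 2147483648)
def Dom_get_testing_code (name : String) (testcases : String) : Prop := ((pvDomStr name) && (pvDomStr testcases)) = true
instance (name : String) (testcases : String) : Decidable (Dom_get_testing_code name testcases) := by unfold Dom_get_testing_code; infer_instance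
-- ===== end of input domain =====

-- B replaces A's one-pass is_param toggle by a filter pass followed by a two-at-a-time
-- deinterleave of the kept lines (objective: simpler decomposition, no stateful alternation).

-- ===== PORT A =====
-- literal port of A's loop: accumulators params/output and the is_param flag
def pvGoA (name : String) : List String → List String → List String → Bool → List String × List String
  | [], params, output, _ => (params, output)
  | l :: rest, params, output, is_param =>
    let l := PySem.Str.strip l
    if PySem.Str.len l == 0 || PySem.Str.startswith l "#" then
      pvGoA name rest params output is_param
    else if is_param then
      pvGoA name rest (params ++ [name ++ "(" ++ l ++ ")"]) output (!is_param)
    else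
      pvGoA name rest params (output ++ [l]) (!is_param)

def get_testing_code (name : String) (testcases : String) : List String × List String :=
  pvGoA name (PySem.Str.splitlines testcases) [] [] true

-- ===== PORT B =====
-- port of Source B's _deinterleave: even-index and odd-index elements, two at a time
def pvDeinterleave : List String → List String × List String
  | [] => ([], [])
  | [p] => ([p], [])
  | p :: o :: rest =>
    let (e, od) := pvDeinterleave rest
    (p :: e, o :: od)

def get_testing_code_alt (name : String) (testcases : String) : List String × List String :=
  let filtered := ((PySem.Str.splitlines testcases).map PySem.Str.strip).filter
    (fun s => !(s == "") && !PySem.Str.startswith s "#")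
  let (evens, odds) := pvDeinterleave filtered
  (evens.map (fun x => name ++ "(" ++ x ++ ")"), odds)

-- ===== PRECONDITION & SPEC =====
def Spec_get_testing_code (name : String) (testcases : String) (out : List String × List String) : Prop := out = get_testing_code_alt name testcases
instance (name : String) (testcases : String) (out : List String × List String) : Decidable (Spec_get_testing_code name testcases out) := by unfold Spec_get_testing_code; infer_instance

-- ===== CLAIM (what is proved, stated in full; the proofs are below) =====
def Claim_equal_get_testing_code : Prop := ∀ (name : String) (testcases : String), Dom_get_testing_code name testcases → Spec_get_testing_code name testcases (get_testing_code name testcases)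

-- ===== LEMMAS AND PROOFS =====

theorem pvDeinterleave_cons : ∀ (x : String) (xs : List String),
    pvDeinterleave (x :: xs) = (x :: (pvDeinterleave xs).2, (pvDeinterleave xs).1)
  | _, [] => by simp [pvDeinterleave]
  | x, y :: rest => by
    rw [pvDeinterleave_cons y rest]
    simp [pvDeinterleave]

theorem pvKeep_eq (s : String) :
    (!(PySem.Str.len s == 0 || PySem.Str.startswith s "#"))
      = (!(s == "") && !PySem.Str.startswith s "#") := by
  have h1 : (PySem.Str.len s == 0) = (s == "") := by simp [PySem.Str.len]
  rw [Bool.not_or, h1]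

theorem pvGoA_eq (name : String) : ∀ (ls params output : List String) (b : Bool),
    pvGoA name ls params output b =
      (let F := (ls.map PySem.Str.strip).filter
         (fun s => !(s == "") && !PySem.Str.startswith s "#")
       let D := pvDeinterleave F
       if b then (params ++ D.1.map (fun x => name ++ "(" ++ x ++ ")"), output ++ D.2)
       else (params ++ D.2.map (fun x => name ++ "(" ++ x ++ ")"), output ++ D.1)) := by
  intro ls
  induction ls with
  | nil => intro params output b; cases b <;> simp [pvGoA, pvDeinterleave]
  | cons l rest ih =>
    intro params output b
    by_cases hk : (PySem.Str.len (PySem.Str.strip l) == 0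
        || PySem.Str.startswith (PySem.Str.strip l) "#") = true
    · have hk' : (!(PySem.Str.strip l == "")
          && !PySem.Str.startswith (PySem.Str.strip l) "#") = false := by
        rw [← pvKeep_eq, hk]; rfl
      simp only [pvGoA, hk, if_pos, List.map_cons, List.filter_cons, hk']
      exact ih params output b
    · have hk' : (!(PySem.Str.strip l == "")
          && !PySem.Str.startswith (PySem.Str.strip l) "#") = true := by
        rw [← pvKeep_eq]
        simp only [Bool.not_eq_true']
        exact Bool.eq_false_iff.mpr hk
      simp only [pvGoA, hk, if_neg, Bool.false_eq_true, not_false_iff,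
        List.map_cons, List.filter_cons, hk', if_true]
      cases b with
      | true =>
        simp only [if_true, Bool.not_true]
        rw [ih (params ++ [name ++ "(" ++ PySem.Str.strip l ++ ")"]) output false]
        simp [pvDeinterleave_cons]
      | false =>
        simp only [Bool.false_eq_true, if_false, Bool.not_false]
        rw [ih params (output ++ [PySem.Str.strip l]) true]
        simp [pvDeinterleave_cons]

-- ===== VERDICT (by name: the statement is the Claim_ definition above) =====
theorem get_testing_code_spec : Claim_equal_get_testing_code := by
  intro name testcases _
  unfold Spec_get_testing_code get_testing_code get_testing_code_alt
  rw [pvGoA_eq]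
  simp
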